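-- pv_equiv track=rewrite | github.com/sakshigoud/nexusai-intern-challenge | task1/handler.py | format_for_channel
-- ===== SOURCE A (Python) =====
-- def format_for_channel(text: str, channel: str) -> str:
--     """Format the response text based on the channel."""
--     if channel == "voice":
--         # Keep only the first two sentences for voice
--         sentences = text.replace("!", "!|").replace(".", ".|").replace("?", "?|").split("|")
--         sentences = [s.strip() for s in sentences if s.strip()]
--         return " ".join(sentences[:2])
--     elif channel == "whatsapp":
--         return text.replace("**", "*")  # WhatsApp uses single asterisks for bold
--     return text  # chat — return as is
-- ===== SOURCE B (Python) =====
-- def format_for_channel(text: str, channel: str) -> str: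
--     """Format the response text based on the channel."""
--     if channel == "voice":
--         # Single scan: cut after each sentence terminator instead of
--         # inserting a marker and re-splitting.
--         sentences = []
--         buf = ""
--         for ch in text:
--             buf += ch
--             if ch in "!.?":
--                 sentences.append(buf)
--                 buf = ""
--         if buf:
--             sentences.append(buf)
--         sentences = [s.strip() for s in sentences if s.strip()]
--         return " ".join(sentences[:2])
--     if channel == "whatsapp":
--         return text.replace("**", "*")
--     return text
-- ===== Notes on version B (the rewrite author's own statement) =====
-- stated objective: alternative
-- what changed: The voice branch now splits into sentences with one character scan that accumulates a buffer and cuts after each of '!', '.', '?', instead of A's insert-a-'|'-marker via three replace() calls followed by split('|').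
-- outside the precondition, e.g. on format_for_channel('a|b', 'voice'): A returns 'a b', B returns 'a|b'
import Mathlib
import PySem

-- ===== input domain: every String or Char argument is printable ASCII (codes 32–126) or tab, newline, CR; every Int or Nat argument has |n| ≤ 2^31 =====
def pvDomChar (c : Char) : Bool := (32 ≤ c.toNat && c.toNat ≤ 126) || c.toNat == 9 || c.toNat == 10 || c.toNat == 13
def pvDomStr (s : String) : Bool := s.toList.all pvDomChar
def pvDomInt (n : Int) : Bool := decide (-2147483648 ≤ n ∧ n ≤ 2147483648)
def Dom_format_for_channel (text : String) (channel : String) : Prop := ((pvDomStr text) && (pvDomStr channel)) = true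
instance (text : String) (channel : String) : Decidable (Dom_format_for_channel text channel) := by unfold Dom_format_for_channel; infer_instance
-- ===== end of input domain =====

-- B replaces the voice branch's marker-insert-and-split with a single character scan
-- that cuts a buffer after each sentence terminator (alternative decomposition, same cost).

-- ===== PORT A =====
-- A, voice branch: text.replace("!","!|").replace(".",".|").replace("?","?|").split("|"),
-- then [s.strip() for s in sentences if s.strip()], then " ".join(sentences[:2]).
def format_for_channel (text : String) (channel : String) : String :=
  if channel = "voice" then
    let marked :=
      PySem.Chars.replace
        (PySem.Chars.replace
          (PySem.Chars.replace text.toList ['!'] ['!', '|'])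
          ['.'] ['.', '|'])
        ['?'] ['?', '|']
    let sentences := PySem.Chars.splitOn marked ['|']
    let kept := (sentences.map PySem.Chars.strip).filter (fun s => !s.isEmpty)
    String.ofList (PySem.Chars.join [' '] (PySem.List.slice kept none (some 2)))
  else if channel = "whatsapp" then
    PySem.Str.replace text "**" "*"
  else text

-- ===== PORT B =====
-- B, voice branch: one scan over the characters; `buf` is the current sentence,
-- cut (terminator included) after '!', '.', '?'; non-empty leftover flushed at the end.
def voiceScan : List Char → List Char → List (List Char)
  | [], buf => if buf.isEmpty then [] else [buf]
  | c :: rest, buf =>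
      if c = '!' ∨ c = '.' ∨ c = '?' then (buf ++ [c]) :: voiceScan rest []
      else voiceScan rest (buf ++ [c])

def format_for_channel_alt (text : String) (channel : String) : String :=
  if channel = "voice" then
    let sentences := voiceScan text.toList []
    let kept := (sentences.map PySem.Chars.strip).filter (fun s => !s.isEmpty)
    String.ofList (PySem.Chars.join [' '] (kept.take 2))
  else if channel = "whatsapp" then
    PySem.Str.replace text "**" "*"
  else text

-- ===== PRECONDITION & SPEC =====
-- Pre_ excludes voice-channel texts that contain '|' — A's internal split marker —
-- on which the extra sentence boundaries at '|' are an artefact of that marker choice,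
-- a corner where neither behaviour is specified; B treats '|' as an ordinary character.
def Pre_format_for_channel (text : String) (channel : String) : Prop :=
  ¬ (channel = "voice" ∧ '|' ∈ text.toList)
instance (text : String) (channel : String) : Decidable (Pre_format_for_channel text channel) := by
  unfold Pre_format_for_channel; infer_instance

def pvWitness_format_for_channel : String × String := ("Hi there. How are you? Great!", "voice")

def Spec_format_for_channel (text : String) (channel : String) (out : String) : Prop :=
  out = format_for_channel_alt text channel
instance (text : String) (channel : String) (out : String) : Decidable (Spec_format_for_channel text channel out) := by
  unfold Spec_format_for_channel; infer_instance

-- ===== CLAIM (what is proved, stated in full; the proofs are below) =====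
def Claim_equal_format_for_channel : Prop := ∀ (text : String) (channel : String), Dom_format_for_channel text channel → Pre_format_for_channel text channel → Spec_format_for_channel text channel (format_for_channel text channel)

-- ===== LEMMAS AND PROOFS =====

-- replace with a one-character pattern is a per-character flatMap
theorem replace_go_single (x : Char) (new : List Char) :
    ∀ (fuel : Nat) (l acc : List Char), l.length ≤ fuel →
      PySem.Chars.replace.go [x] new fuel l acc
        = acc.reverse ++ l.flatMap (fun c => if c = x then new else [c]) := by
  intro fuel
  induction fuel with
  | zero =>
    intro l acc h
    have : l = [] := by cases l <;> simp_all
    subst this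
    rw [PySem.Chars.replace.go]
    simp
  | succ f ih =>
    intro l acc h
    cases l with
    | nil => rw [PySem.Chars.replace.go]; simp; omega
    | cons c t =>
      rw [PySem.Chars.replace.go]
      simp only [List.isPrefixOf, Bool.and_true]
      by_cases hx : c = x
      · subst hx
        simp only [beq_self_eq_true, if_pos, List.length_singleton, List.drop_succ_cons,
          List.drop_zero]
        rw [ih t (new.reverse ++ acc) (by simpa using Nat.le_of_succ_le_succ h)]
        simp
      · rw [if_neg (by simp [Ne.symm hx])]
        rw [ih t (c :: acc) (by simpa using Nat.le_of_succ_le_succ h)]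
        simp [hx]

theorem replace_single (x : Char) (new l : List Char) :
    PySem.Chars.replace l [x] new = l.flatMap (fun c => if c = x then new else [c]) := by
  rw [PySem.Chars.replace]
  simp only [List.isEmpty_iff, reduceIte, List.cons_ne_self]
  rw [replace_go_single x new l.length l [] le_rfl]
  simp

-- a structural version of splitOn with the one-character separator '|'
def splitAux (pre : List Char) : List Char → List (List Char)
  | [] => [pre]
  | c :: t => if c = '|' then pre :: splitAux [] t else splitAux (pre ++ [c]) t

theorem splitOn_go_bar :
    ∀ (fuel : Nat) (l cur : List Char) (acc : List (List Char)), l.length ≤ fuel →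
      PySem.Chars.splitOn.go ['|'] fuel l cur acc = acc.reverse ++ splitAux cur.reverse l := by
  intro fuel
  induction fuel with
  | zero =>
    intro l cur acc h
    have : l = [] := by cases l <;> simp_all
    subst this
    rw [PySem.Chars.splitOn.go]
    simp [splitAux]
  | succ f ih =>
    intro l cur acc h
    cases l with
    | nil => rw [PySem.Chars.splitOn.go]; simp [splitAux]; omega
    | cons c t =>
      rw [PySem.Chars.splitOn.go]
      simp only [List.isPrefixOf, Bool.and_true]
      by_cases hx : c = '|'
      · subst hx
        simp only [beq_self_eq_true, if_pos, List.length_singleton, List.drop_succ_cons,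
          List.drop_zero]
        rw [ih t [] (cur.reverse :: acc) (by simpa using Nat.le_of_succ_le_succ h)]
        simp [splitAux]
      · rw [if_neg (by simp [Ne.symm hx])]
        rw [ih t (c :: cur) acc (by simpa using Nat.le_of_succ_le_succ h)]
        simp [splitAux, hx]

theorem splitOn_bar (l : List Char) :
    PySem.Chars.splitOn l ['|'] = splitAux [] l := by
  rw [PySem.Chars.splitOn, splitOn_go_bar (l.length + 1) l [] [] (by omega)]
  simp

-- the per-character expansion performed by A's three replaces, on '|'-free input
def expandChar (c : Char) : List Char :=
  if c = '!' ∨ c = '.' ∨ c = '?' then [c, '|'] else [c]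

theorem three_replaces (l : List Char) (h : '|' ∉ l) :
    PySem.Chars.replace
      (PySem.Chars.replace
        (PySem.Chars.replace l ['!'] ['!', '|'])
        ['.'] ['.', '|'])
      ['?'] ['?', '|'] = l.flatMap expandChar := by
  rw [replace_single, replace_single, replace_single]
  rw [List.flatMap_assoc, List.flatMap_assoc]
  induction l with
  | nil => rfl
  | cons c t iht =>
    have hc : c ≠ '|' := by intro hc; exact h (hc ▸ List.mem_cons_self ..)
    have ht : '|' ∉ t := fun m => h (List.mem_cons_of_mem _ m)
    simp only [List.flatMap_cons, iht ht]
    congr 1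
    by_cases h1 : c = '!'
    · subst h1; rfl
    · by_cases h2 : c = '.'
      · subst h2; rfl
      · by_cases h3 : c = '?'
        · subst h3; rfl
        · simp [expandChar, h1, h2, h3]

-- the scan that always keeps the leftover buffer, empty or not
def scanF (pre : List Char) : List Char → List (List Char)
  | [] => [pre]
  | c :: t => if c = '!' ∨ c = '.' ∨ c = '?' then (pre ++ [c]) :: scanF [] t else scanF (pre ++ [c]) t

theorem splitAux_expand (l : List Char) (h : '|' ∉ l) :
    ∀ pre, splitAux pre (l.flatMap expandChar) = scanF pre l := by
  induction l with
  | nil => intro pre; rfl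
  | cons c t iht =>
    intro pre
    have hc : c ≠ '|' := by intro hc; exact h (hc ▸ List.mem_cons_self ..)
    have ht : '|' ∉ t := fun m => h (List.mem_cons_of_mem _ m)
    by_cases hterm : c = '!' ∨ c = '.' ∨ c = '?'
    · simp only [List.flatMap_cons, expandChar, List.cons_append, List.nil_append,
        splitAux, scanF, hc, reduceIte, if_pos hterm]
      simp [iht ht]
    · simp only [List.flatMap_cons, expandChar, List.cons_append, List.nil_append,
        splitAux, scanF, hc, reduceIte, if_neg hterm]
      exact iht ht _

-- after strip-and-drop-empties the always-kept leftover and B's non-empty-only flush agree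
theorem filtered_scan :
    ∀ (l pre : List Char),
      ((scanF pre l).map PySem.Chars.strip).filter (fun s => !s.isEmpty)
        = ((voiceScan l pre).map PySem.Chars.strip).filter (fun s => !s.isEmpty) := by
  intro l
  induction l with
  | nil =>
    intro pre
    by_cases hp : pre.isEmpty
    · have : pre = [] := by simpa [List.isEmpty_iff] using hp
      subst this
      simp [scanF, voiceScan, PySem.Chars.strip, PySem.Chars.lstrip, PySem.Chars.rstrip]
    · simp [scanF, voiceScan, hp]
  | cons c t iht =>
    intro pre
    by_cases hterm : c = '!' ∨ c = '.' ∨ c = '?'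
    · simp only [scanF, voiceScan, if_pos hterm, List.map_cons, List.filter_cons]
      rw [iht []]
    · simp only [scanF, voiceScan, if_neg hterm]
      exact iht _

-- ===== VERDICT (by name: the statement is the Claim_ definition above) =====
theorem format_for_channel_spec : Claim_equal_format_for_channel := by
  intro text channel _hdom hpre
  unfold Spec_format_for_channel format_for_channel format_for_channel_alt
  by_cases hv : channel = "voice"
  · have hbar : '|' ∉ text.toList := fun m => hpre ⟨hv, m⟩
    simp only [hv, reduceIte]
    rw [three_replaces text.toList hbar, splitOn_bar, splitAux_expand text.toList hbar [],
      filtered_scan, PySem.List.slice_to _ (by norm_num)]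
    rfl
  · simp [hv]
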